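-- pv_equiv track=rewrite | github.com/elophanto/EloPhanto | cli/init_cmd.py | _best_ollama
-- ===== SOURCE A (Python) =====
-- def _best_ollama(models: list[str], task_type: str) -> str:
--     """Pick the best available Ollama model for a task type."""
--     if not models:
--         return ""
--
--     if task_type == "planning":
--         for pattern in ["qwen2.5:32b", "qwen2.5:14b", "llama3.1:70b", "llama3.1:8b"]:
--             for m in models:
--                 if pattern in m:
--                     return m
--     elif task_type == "coding":
--         for pattern in ["qwen2.5-coder", "deepseek-coder", "codellama"]:
--             for m in models:
--                 if pattern in m:
--                     return m
--     elif task_type in ("analysis", "simple"):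
--         for pattern in ["qwen2.5:7b", "qwen2.5:3b", "llama3.2:3b", "phi"]:
--             for m in models:
--                 if pattern in m:
--                     return m
--
--     return models[0]
-- ===== SOURCE B (Python) =====
-- _PATTERNS = {
--     "planning": ["qwen2.5:32b", "qwen2.5:14b", "llama3.1:70b", "llama3.1:8b"],
--     "coding": ["qwen2.5-coder", "deepseek-coder", "codellama"],
--     "analysis": ["qwen2.5:7b", "qwen2.5:3b", "llama3.2:3b", "phi"],
--     "simple": ["qwen2.5:7b", "qwen2.5:3b", "llama3.2:3b", "phi"],
-- }
--
--
-- def _best_ollama(models: list[str], task_type: str) -> str: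
--     """Pick the best available Ollama model for a task type."""
--     if not models:
--         return ""
--     pats = _PATTERNS.get(task_type, [])
--
--     def rank(m: str) -> int:
--         for i, p in enumerate(pats):
--             if p in m:
--                 return i
--         return len(pats)
--
--     best = min(range(len(models)), key=lambda j: (rank(models[j]), j))
--     return models[best]
-- ===== Notes on version B (the rewrite author's own statement) =====
-- stated objective: alternative
-- what changed: Replaces A's if/elif chain with pattern-major nested scans and early returns by a task_type->patterns dict plus a single model-major argmin over the lexicographic key (rank of first matching pattern, index), falling back to models[0] when nothing matches.
import Mathlib
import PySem

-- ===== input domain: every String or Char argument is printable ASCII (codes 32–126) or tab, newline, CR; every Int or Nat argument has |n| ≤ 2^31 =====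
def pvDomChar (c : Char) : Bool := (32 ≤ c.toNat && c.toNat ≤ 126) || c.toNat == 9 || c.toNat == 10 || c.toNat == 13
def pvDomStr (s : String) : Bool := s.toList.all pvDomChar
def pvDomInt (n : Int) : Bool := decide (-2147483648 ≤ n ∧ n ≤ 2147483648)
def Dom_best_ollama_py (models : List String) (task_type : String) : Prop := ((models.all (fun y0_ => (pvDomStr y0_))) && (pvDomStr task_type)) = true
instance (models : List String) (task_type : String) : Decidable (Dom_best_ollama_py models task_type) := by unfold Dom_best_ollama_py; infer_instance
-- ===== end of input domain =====

-- B replaces A's pattern-major nested scans (if/elif chain with early returns) by a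
-- task_type->patterns dict and a single model-major argmin on the key (rank, index);
-- same result, similar cost (objective: alternative).

-- ===== PORT A =====
-- 'for pattern in pats: for m in models: if pattern in m: return m' — outer loop is the
-- structural recursion, the inner early-returning loop is List.find?.
def bestScanA (pats : List String) (models : List String) : Option String :=
  match pats with
  | [] => none
  | p :: rest =>
    match models.find? (fun m => PySem.Str.isIn p m) with
    | some m => some m
    | none => bestScanA rest models

def best_ollama_py (models : List String) (task_type : String) : String :=
  match models with
  | [] => ""
  | m0 :: _ =>
    if task_type = "planning" then
      (bestScanA ["qwen2.5:32b", "qwen2.5:14b", "llama3.1:70b", "llama3.1:8b"] models).getD m0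
    else if task_type = "coding" then
      (bestScanA ["qwen2.5-coder", "deepseek-coder", "codellama"] models).getD m0
    else if task_type = "analysis" ∨ task_type = "simple" then
      (bestScanA ["qwen2.5:7b", "qwen2.5:3b", "llama3.2:3b", "phi"] models).getD m0
    else m0

-- ===== PORT B =====
def bestPatterns : PySem.Dict String (List String) :=
  PySem.Dict.ofList
    [("planning", ["qwen2.5:32b", "qwen2.5:14b", "llama3.1:70b", "llama3.1:8b"]),
     ("coding", ["qwen2.5-coder", "deepseek-coder", "codellama"]),
     ("analysis", ["qwen2.5:7b", "qwen2.5:3b", "llama3.2:3b", "phi"]),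
     ("simple", ["qwen2.5:7b", "qwen2.5:3b", "llama3.2:3b", "phi"])]

-- rank(m): 'for i, p in enumerate(pats): if p in m: return i' then 'return len(pats)'
def bestRank (pats : List String) (m : String) : Nat :=
  match pats with
  | [] => 0
  | p :: rest => if PySem.Str.isIn p m then 0 else bestRank rest m + 1

-- Python tuple comparison (a, b) < (c, d) on ints, lexicographic.
def pairLt (x y : Nat × Nat) : Bool := x.1 < y.1 || (x.1 == y.1 && x.2 < y.2)

-- min(range(len(models)), key=...): fold keeping the current best, replace on strictly-smaller key
-- (= CPython's min: the FIRST minimal element wins). Indices are nonnegative, kept as Nat.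
def best_ollama_py_alt (models : List String) (task_type : String) : String :=
  match models with
  | [] => ""
  | _ :: _ =>
    let pats := bestPatterns.getD task_type []
    let key : Nat → Nat × Nat := fun j => (bestRank pats (models.getD j ""), j)
    let best := (List.range models.length).foldl
      (fun b j => if pairLt (key j) (key b) then j else b) 0
    models.getD best ""

-- ===== PRECONDITION & SPEC =====
def Spec_best_ollama_py (models : List String) (task_type : String) (out : String) : Prop := out = best_ollama_py_alt models task_type
instance (models : List String) (task_type : String) (out : String) : Decidable (Spec_best_ollama_py models task_type out) := by unfold Spec_best_ollama_py; infer_instance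

-- ===== CLAIM (what is proved, stated in full; the proofs are below) =====
def Claim_equal_best_ollama_py : Prop := ∀ (models : List String) (task_type : String), Dom_best_ollama_py models task_type → Spec_best_ollama_py models task_type (best_ollama_py models task_type)

-- ===== LEMMAS AND PROOFS =====

-- strict lex order on the keys, as a Prop
def keyLt (x y : Nat × Nat) : Prop := x.1 < y.1 ∨ (x.1 = y.1 ∧ x.2 < y.2)

theorem pairLt_iff (x y : Nat × Nat) : pairLt x y = true ↔ keyLt x y := by
  simp [pairLt, keyLt]

-- A's chosen index: first index whose model contains the first matching pattern
def bestIdxA (pats : List String) (models : List String) : Nat :=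
  match pats with
  | [] => 0
  | p :: rest =>
    match models.findIdx? (fun m => PySem.Str.isIn p m) with
    | some j => j
    | none => bestIdxA rest models

theorem bestScanA_cons (p : String) (rest models : List String) :
    bestScanA (p :: rest) models =
      match models.find? (fun m => PySem.Str.isIn p m) with
      | some m => some m
      | none => bestScanA rest models := rfl

theorem bestIdxA_cons (p : String) (rest models : List String) :
    bestIdxA (p :: rest) models =
      match models.findIdx? (fun m => PySem.Str.isIn p m) with
      | some j => j
      | none => bestIdxA rest models := rfl

theorem bestRank_of_isIn {p m : String} (rest : List String)
    (h : PySem.Str.isIn p m = true) : bestRank (p :: rest) m = 0 := by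
  show (if PySem.Str.isIn p m = true then 0 else bestRank rest m + 1) = 0
  rw [h]; simp

theorem bestRank_of_not_isIn {p m : String} (rest : List String)
    (h : PySem.Str.isIn p m = false) : bestRank (p :: rest) m = bestRank rest m + 1 := by
  show (if PySem.Str.isIn p m = true then 0 else bestRank rest m + 1) = bestRank rest m + 1
  rw [h]; simp

theorem find?_eq_getD_findIdx? (q : String → Bool) (models : List String) :
    models.find? q = (models.findIdx? q).map (fun j => models.getD j "") := by
  induction models with
  | nil => simp
  | cons m tl ih =>
    by_cases h : q m
    · simp [List.findIdx?_cons, h]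
    · cases hi : List.findIdx? q tl with
      | none => simp [List.findIdx?_cons, h, hi, hi ▸ ih]
      | some j => simp [List.findIdx?_cons, h, hi, hi ▸ ih]

theorem findIdx?_some_spec (q : String → Bool) (models : List String) (j : Nat)
    (h : models.findIdx? q = some j) :
    j < models.length ∧ q (models.getD j "") = true ∧
      ∀ i, i < j → q (models.getD i "") = false := by
  induction models generalizing j with
  | nil => simp at h
  | cons m tl ih =>
    by_cases hm : q m
    · simp [List.findIdx?_cons, hm] at h
      subst h; simpa using hm
    · simp [List.findIdx?_cons, hm] at h
      obtain ⟨j', hj', rfl⟩ := h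
      obtain ⟨h1, h2, h3⟩ := ih j' hj'
      refine ⟨by simpa using h1, by simpa using h2, ?_⟩
      intro i hi
      cases i with
      | zero => simpa using hm
      | succ i' => simpa using h3 i' (by omega)

theorem findIdx?_none_spec (q : String → Bool) (models : List String)
    (h : models.findIdx? q = none) :
    ∀ i, i < models.length → q (models.getD i "") = false := by
  intro i hilen
  have hall : ∀ x ∈ models, q x = false := by
    simpa [List.findIdx?_eq_none_iff] using h
  have hmem : models.getD i "" ∈ models := by
    rw [List.getD_eq_getElem?_getD, List.getElem?_eq_getElem hilen]
    exact List.getElem_mem hilen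
  exact hall _ hmem

-- the A-side scan returns the model at bestIdxA
theorem bestScanA_eq_getD (pats models : List String) :
    (bestScanA pats models).getD (models.getD 0 "") =
      models.getD (bestIdxA pats models) "" := by
  induction pats with
  | nil => simp [bestScanA, bestIdxA]
  | cons p rest ih =>
    rw [bestScanA_cons, bestIdxA_cons, find?_eq_getD_findIdx?]
    cases h : models.findIdx? (fun m => PySem.Str.isIn p m) with
    | none => simpa using ih
    | some j => simp

-- bestIdxA is in range and lex-minimal for the key (bestRank, index)
theorem bestIdxA_min (pats models : List String) (hne : models ≠ []) :
    bestIdxA pats models < models.length ∧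
      ∀ j, j < models.length →
        ¬ keyLt (bestRank pats (models.getD j ""), j)
              (bestRank pats (models.getD (bestIdxA pats models) ""), bestIdxA pats models) := by
  induction pats with
  | nil =>
    refine ⟨?_, ?_⟩
    · cases models with
      | nil => exact absurd rfl hne
      | cons m tl => simp [bestIdxA]
    · intro j hj
      simp [bestIdxA, bestRank, keyLt]
  | cons p rest ih =>
    cases h : models.findIdx? (fun m => PySem.Str.isIn p m) with
    | some j0 =>
      obtain ⟨h1, h2, h3⟩ := findIdx?_some_spec _ _ _ h
      have h2' : PySem.Str.isIn p (models.getD j0 "") = true := h2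
      rw [bestIdxA_cons, h]
      refine ⟨h1, ?_⟩
      intro j hj
      by_cases hm : PySem.Str.isIn p (models.getD j "") = true
      · have hge : ¬ j < j0 := by
          intro hlt
          have hF : PySem.Str.isIn p (models.getD j "") = false := h3 j hlt
          rw [hF] at hm; exact Bool.false_ne_true hm
        rw [bestRank_of_isIn rest hm, bestRank_of_isIn rest h2']
        simp only [keyLt]; omega
      · rw [Bool.not_eq_true] at hm
        rw [bestRank_of_not_isIn rest hm, bestRank_of_isIn rest h2']
        simp only [keyLt]; omega
    | none =>
      have hnone := findIdx?_none_spec _ _ h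
      obtain ⟨ih1, ih2⟩ := ih
      rw [bestIdxA_cons, h]
      refine ⟨ih1, ?_⟩
      intro j hj
      have hj' : PySem.Str.isIn p (models.getD j "") = false := hnone j hj
      have hb : PySem.Str.isIn p (models.getD (bestIdxA rest models) "") = false :=
        hnone _ ih1
      have hmin := ih2 j hj
      rw [bestRank_of_not_isIn rest hj', bestRank_of_not_isIn rest hb]
      simp only [keyLt] at hmin ⊢
      omega

-- generic argmin fold: the result is the start or a list element, and lex-minimal among them
theorem fold_argmin_spec (f : Nat → Nat × Nat) (L : List Nat) (b : Nat) :
    ((L.foldl (fun b j => if pairLt (f j) (f b) then j else b) b) = b ∨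
      (L.foldl (fun b j => if pairLt (f j) (f b) then j else b) b) ∈ L) ∧
    ∀ x, (x = b ∨ x ∈ L) →
      ¬ keyLt (f x) (f (L.foldl (fun b j => if pairLt (f j) (f b) then j else b) b)) := by
  induction L generalizing b with
  | nil =>
    refine ⟨Or.inl rfl, ?_⟩
    intro x hx
    rcases hx with rfl | hx
    · simp [keyLt]
    · simp at hx
  | cons j L' ih =>
    set g : Nat → Nat → Nat := fun b j => if pairLt (f j) (f b) then j else b with hg
    obtain ⟨ihm, ihmin⟩ := ih (g b j)
    have hstep : List.foldl g b (j :: L') = List.foldl g (g b j) L' := by simp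
    have hsbj : g b j = b ∨ g b j = j := by rw [hg]; dsimp only; split <;> simp
    have hbs : ¬ keyLt (f b) (f (g b j)) := by
      rw [hg]; dsimp only; split
      · rename_i hlt
        rw [pairLt_iff] at hlt
        simp only [keyLt] at hlt ⊢; omega
      · simp [keyLt]
    have hjs : ¬ keyLt (f j) (f (g b j)) := by
      rw [hg]; dsimp only; split
      · simp [keyLt]
      · rename_i hlt
        intro hk
        rw [← pairLt_iff] at hk
        simp [hk] at hlt
    have htrans : ∀ y, ¬ keyLt (f y) (f (g b j)) →
        ¬ keyLt (f y) (f (List.foldl g (g b j) L')) := by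
      intro y hy
      have h1 := ihmin (g b j) (Or.inl rfl)
      simp only [keyLt] at hy h1 ⊢; omega
    constructor
    · rw [hstep]
      rcases ihm with hm | hm
      · rcases hsbj with hb' | hj'
        · exact Or.inl (hm.trans hb')
        · right; rw [hm, hj']; exact List.mem_cons_self ..
      · exact Or.inr (List.mem_cons_of_mem _ hm)
    · intro x hx
      rw [hstep]
      rcases hx with rfl | hx
      · exact htrans x hbs
      · rcases List.mem_cons.mp hx with rfl | hx'
        · exact htrans x hjs
        · exact ihmin x (Or.inr hx')

-- the dict lookup agrees with A's if/elif chain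
theorem bestPatterns_getD (task_type : String) :
    bestPatterns.getD task_type [] =
      (if task_type = "planning" then ["qwen2.5:32b", "qwen2.5:14b", "llama3.1:70b", "llama3.1:8b"]
       else if task_type = "coding" then ["qwen2.5-coder", "deepseek-coder", "codellama"]
       else if task_type = "analysis" ∨ task_type = "simple" then ["qwen2.5:7b", "qwen2.5:3b", "llama3.2:3b", "phi"]
       else []) := by
  by_cases h1 : task_type = "planning"
  · subst h1; decide
  by_cases h2 : task_type = "coding"
  · subst h2; decide
  by_cases h3 : task_type = "analysis"
  · subst h3; decide
  by_cases h4 : task_type = "simple"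
  · subst h4; decide
  have e1 : ("planning" == task_type) = false := beq_eq_false_iff_ne.mpr fun h => h1 h.symm
  have e2 : ("coding" == task_type) = false := beq_eq_false_iff_ne.mpr fun h => h2 h.symm
  have e3 : ("analysis" == task_type) = false := beq_eq_false_iff_ne.mpr fun h => h3 h.symm
  have e4 : ("simple" == task_type) = false := beq_eq_false_iff_ne.mpr fun h => h4 h.symm
  have hmk : bestPatterns = PySem.Dict.mk
      [("planning", ["qwen2.5:32b", "qwen2.5:14b", "llama3.1:70b", "llama3.1:8b"]),
       ("coding", ["qwen2.5-coder", "deepseek-coder", "codellama"]),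
       ("analysis", ["qwen2.5:7b", "qwen2.5:3b", "llama3.2:3b", "phi"]),
       ("simple", ["qwen2.5:7b", "qwen2.5:3b", "llama3.2:3b", "phi"])] := by decide
  rw [hmk]
  simp only [PySem.Dict.getD_eq_get?_getD, PySem.Dict.get?_mk_cons,
    e1, e2, e3, e4, Bool.false_eq_true, h1, h2, h3, h4, or_self, if_neg, not_false_iff]
  rfl

-- central lemma: A's scan (with fallback models[0]) equals B's argmin, for any pattern list
theorem scan_eq_argmin (pats : List String) (m0 : String) (ms : List String) :
    (bestScanA pats (m0 :: ms)).getD m0 =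
      (m0 :: ms).getD
        ((List.range (m0 :: ms).length).foldl
          (fun b j => if pairLt (bestRank pats ((m0 :: ms).getD j ""), j)
                              (bestRank pats ((m0 :: ms).getD b ""), b) then j else b) 0) "" := by
  set models := m0 :: ms with hmodels
  set f : Nat → Nat × Nat := fun j => (bestRank pats (models.getD j ""), j) with hf
  set res := (List.range models.length).foldl (fun b j => if pairLt (f j) (f b) then j else b) 0 with hres
  obtain ⟨hmem, hmin⟩ := fold_argmin_spec f (List.range models.length) 0
  have hlen : 0 < models.length := by simp [hmodels]
  have hreslt : res < models.length := by
    rcases hmem with h | h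
    · rw [hres, h]; exact hlen
    · rw [hres]; exact List.mem_range.mp h
  have hresmin : ∀ j, j < models.length → ¬ keyLt (f j) (f res) := by
    intro j hj
    by_cases hj0 : j = 0
    · exact hres ▸ hmin j (Or.inl hj0)
    · exact hres ▸ hmin j (Or.inr (List.mem_range.mpr hj))
  obtain ⟨hia, hiamin⟩ := bestIdxA_min pats models (by simp [hmodels])
  -- both indices are lex-minimal; keys carry the index, so they are equal
  have h1 : ¬ keyLt (f res) (f (bestIdxA pats models)) := hiamin res hreslt
  have h2 : ¬ keyLt (f (bestIdxA pats models)) (f res) := hresmin _ hia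
  have heq : bestIdxA pats models = res := by
    simp only [hf, keyLt] at h1 h2
    omega
  have h0 : m0 = models.getD 0 "" := by simp [hmodels]
  rw [h0, bestScanA_eq_getD, heq]

-- ===== VERDICT (by name: the statement is the Claim_ definition above) =====
theorem best_ollama_py_spec : Claim_equal_best_ollama_py := by
  intro models task_type _
  unfold Spec_best_ollama_py
  cases models with
  | nil => rfl
  | cons m0 ms =>
    show best_ollama_py (m0 :: ms) task_type = best_ollama_py_alt (m0 :: ms) task_type
    simp only [best_ollama_py, best_ollama_py_alt, bestPatterns_getD]
    split_ifs with h1 h2 h3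
    · exact scan_eq_argmin _ m0 ms
    · exact scan_eq_argmin _ m0 ms
    · exact scan_eq_argmin _ m0 ms
    · -- unknown task type: empty pattern list, argmin is index 0
      have := scan_eq_argmin [] m0 ms
      simpa [bestScanA] using this
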